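-- pv_equiv track=rewrite | github.com/soilerl/HuaweiProject | analyzeData/common.py | getTimeListFromTuple
-- ===== SOURCE A (Python) =====
-- def getTimeListFromTuple(date):
--     """输入一个时间的四元组，返回一个时间列表
--        如输入: (2020, 1, 2020, 2)
--        输出：[(2020,1),(2020,2)]
--     """
--     timeList = []
--     for i in range(date[0] * 12 + date[1], date[2] * 12 + date[3] + 1):
--         y = int((i - i % 12) / 12)
--         m = i % 12
--         if m == 0:
--             m = 12
--             y = y - 1
--         timeList.append((y, m))
--     return timeList
-- ===== SOURCE B (Python) =====
-- def getTimeListFromTuple(date):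
--     y1, m1, y2, m2 = date
--     # normalize both endpoints so the month lies in 1..12 (preserves year*12+month)
--     ay, am = y1 + (m1 - 1) // 12, (m1 - 1) % 12 + 1
--     by, bm = y2 + (m2 - 1) // 12, (m2 - 1) % 12 + 1
--     if (ay, am) > (by, bm):
--         return []
--     if ay == by:
--         return [(ay, m) for m in range(am, bm + 1)]
--     out = [(ay, m) for m in range(am, 13)]
--     for y in range(ay + 1, by):
--         out += [(y, m) for m in range(1, 13)]
--     out += [(by, m) for m in range(1, bm + 1)]
--     return out
-- ===== Notes on version B (the rewrite author's own statement) =====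
-- stated objective: alternative
-- what changed: A runs one linear loop over a flattened month index and decodes every index back into (year, month) with %12 and a float division; B never enumerates a flattened index: it normalizes the two endpoints once and builds the answer in three staged pieces per calendar year - a partial first-year row, full 12-month rows for the interior years, and a partial last-year row - from range comprehensions.
import Mathlib
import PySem

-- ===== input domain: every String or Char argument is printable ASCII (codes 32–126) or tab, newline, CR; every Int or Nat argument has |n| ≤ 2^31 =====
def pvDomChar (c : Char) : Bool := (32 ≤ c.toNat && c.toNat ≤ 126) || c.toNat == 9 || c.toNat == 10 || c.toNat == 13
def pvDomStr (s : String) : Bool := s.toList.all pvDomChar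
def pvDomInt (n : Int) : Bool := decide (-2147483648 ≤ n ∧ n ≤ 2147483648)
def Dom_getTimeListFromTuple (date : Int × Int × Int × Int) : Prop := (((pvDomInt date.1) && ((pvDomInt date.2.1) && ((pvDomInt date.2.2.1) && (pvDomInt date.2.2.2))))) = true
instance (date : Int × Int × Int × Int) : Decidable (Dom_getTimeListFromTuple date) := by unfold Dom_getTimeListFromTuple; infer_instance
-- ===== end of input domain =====

-- B replaces A's linear loop over a flattened month index (decoded per element with %12
-- and a float division) by a year-structured construction: first-year row, full interior
-- years, last-year row; objective: alternative (same cost, different shape).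


-- ===== PORT A =====
-- 'int((i - i%12)/12)': the numerator is exactly divisible by 12 and within Dom the float
-- division is exact, so the value is the exact integer quotient (= floordiv here).
def getTimeListFromTuple (date : Int × Int × Int × Int) : List (Int × Int) :=
  (PySem.List.pyRange (date.1 * 12 + date.2.1) (date.2.2.1 * 12 + date.2.2.2 + 1) 1).foldl
    (fun timeList i =>
      let y := PySem.Int.floordiv (i - PySem.Int.mod i 12) 12
      let m := PySem.Int.mod i 12
      if m = 0 then timeList ++ [(y - 1, 12)] else timeList ++ [(y, m)]) []

-- ===== PORT B =====
-- Source B: normalize both endpoints, then first-year row ++ full interior-year rows ++ last-year row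
def getTimeListFromTuple_alt (date : Int × Int × Int × Int) : List (Int × Int) :=
  let ay := date.1 + PySem.Int.floordiv (date.2.1 - 1) 12
  let am := PySem.Int.mod (date.2.1 - 1) 12 + 1
  let by_ := date.2.2.1 + PySem.Int.floordiv (date.2.2.2 - 1) 12
  let bm := PySem.Int.mod (date.2.2.2 - 1) 12 + 1
  -- '(ay, am) > (by_, bm)': Python tuple comparison
  if by_ < ay ∨ (ay = by_ ∧ bm < am) then []
  else if ay = by_ then (PySem.List.pyRange am (bm + 1) 1).map (fun m => (ay, m))
  else
    let out := (PySem.List.pyRange am 13 1).map (fun m => (ay, m))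
    let out := (PySem.List.pyRange (ay + 1) by_ 1).foldl
      (fun acc y => acc ++ (PySem.List.pyRange 1 13 1).map (fun m => (y, m))) out
    out ++ (PySem.List.pyRange 1 (bm + 1) 1).map (fun m => (by_, m))

-- ===== PRECONDITION & SPEC =====
def Spec_getTimeListFromTuple (date : Int × Int × Int × Int) (out : List (Int × Int)) : Prop := out = getTimeListFromTuple_alt date
instance (date : Int × Int × Int × Int) (out : List (Int × Int)) : Decidable (Spec_getTimeListFromTuple date out) := by unfold Spec_getTimeListFromTuple; infer_instance

-- ===== CLAIM (what is proved, stated in full; the proofs are below) =====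
def Claim_equal_getTimeListFromTuple : Prop := ∀ (date : Int × Int × Int × Int), Dom_getTimeListFromTuple date → Spec_getTimeListFromTuple date (getTimeListFromTuple date)

-- ===== LEMMAS AND PROOFS =====

-- the pair A emits at index i
def decodeA (i : Int) : Int × Int :=
  if i % 12 = 0 then (i / 12 - 1, 12) else (i / 12, i % 12)

theorem bodyA_eq (tl : List (Int × Int)) (i : Int) :
    (let y := PySem.Int.floordiv (i - PySem.Int.mod i 12) 12
     let m := PySem.Int.mod i 12
     if m = 0 then tl ++ [(y - 1, 12)] else tl ++ [(y, m)]) = tl ++ [decodeA i] := by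
  have h12 : (0:Int) < 12 := by norm_num
  have hm : PySem.Int.mod i 12 = i % 12 := PySem.Int.mod_eq_emod_of_pos h12
  have hsub : i - i % 12 = (i / 12) * 12 := by
    have := Int.ediv_add_emod i 12; omega
  have hy : PySem.Int.floordiv (i - i % 12) 12 = i / 12 := by
    rw [PySem.Int.floordiv_eq_ediv_of_pos h12, hsub, Int.mul_ediv_cancel _ (by norm_num)]
  simp only [hm, hy, decodeA]
  split <;> rfl

theorem getTimeListFromTuple_eq_map (date : Int × Int × Int × Int) :
    getTimeListFromTuple date =
      (PySem.List.pyRange (date.1 * 12 + date.2.1) (date.2.2.1 * 12 + date.2.2.2 + 1) 1).map decodeA := by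
  unfold getTimeListFromTuple
  have hfun : (fun (timeList : List (Int × Int)) (i : Int) =>
      let y := PySem.Int.floordiv (i - PySem.Int.mod i 12) 12
      let m := PySem.Int.mod i 12
      if m = 0 then timeList ++ [(y - 1, 12)] else timeList ++ [(y, m)])
      = fun tl i => tl ++ [decodeA i] :=
    funext fun tl => funext fun i => bodyA_eq tl i
  rw [hfun, PySem.List.foldl_append_singleton_eq_map]
  simp

theorem decodeA_of_norm (y m : Int) (h1 : 1 ≤ m) (h2 : m ≤ 12) :
    decodeA (y * 12 + m) = (y, m) := by
  unfold decodeA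
  by_cases hm : m = 12
  · subst hm
    have hmod : (y * 12 + 12) % 12 = 0 := by omega
    have hdiv : (y * 12 + 12) / 12 = y + 1 := by
      have : y * 12 + 12 = (y + 1) * 12 := by ring
      rw [this, Int.mul_ediv_cancel _ (by norm_num)]
    simp [hmod, hdiv]
  · have hmod : (y * 12 + m) % 12 = m := by omega
    have hdiv : (y * 12 + m) / 12 = y := by
      have := Int.ediv_add_emod (y * 12 + m) 12
      omega
    simp [hmod, hdiv, show m ≠ 0 by omega]

-- one calendar-year row: the linear indices y*12+a .. y*12+b-1 decode to months a .. b-1 of year y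
theorem rowEq (y : Int) : ∀ (k : Nat) (a b : Int), b - a = (k : Int) → 1 ≤ a → b ≤ 13 →
    (PySem.List.pyRange (y * 12 + a) (y * 12 + b) 1).map decodeA
      = (PySem.List.pyRange a b 1).map (fun m => (y, m)) := by
  intro k
  induction k with
  | zero =>
    intro a b hk _ _
    rw [PySem.List.pyRange_one_eq_nil (by omega), PySem.List.pyRange_one_eq_nil (by omega)]
    rfl
  | succ k ih =>
    intro a b hk h1 h2
    rw [PySem.List.pyRange_one_cons (by omega : y * 12 + a < y * 12 + b),
        PySem.List.pyRange_one_cons (by omega : a < b), List.map_cons, List.map_cons,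
        decodeA_of_norm y a h1 (by omega)]
    have : y * 12 + a + 1 = y * 12 + (a + 1) := by ring
    rw [this, ih (a + 1) b (by omega) (by omega) h2]

-- full interior years: flatMap of 12-month rows = the decoded linear range
theorem yearsEq : ∀ (k : Nat) (y : Int),
    (PySem.List.pyRange y (y + (k : Int)) 1).flatMap
        (fun yy => (PySem.List.pyRange 1 13 1).map (fun m => (yy, m)))
      = (PySem.List.pyRange (y * 12 + 1) ((y + (k : Int)) * 12 + 1) 1).map decodeA := by
  intro k
  induction k with
  | zero =>
    intro y
    simp only [Nat.cast_zero, add_zero]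
    rw [PySem.List.pyRange_one_eq_nil (le_refl y), PySem.List.pyRange_one_eq_nil (le_refl _)]
    rfl
  | succ k ih =>
    intro y
    have hc : y < y + ((k + 1 : Nat) : Int) := by push_cast; omega
    rw [PySem.List.pyRange_one_cons hc, List.flatMap_cons]
    have hsplit := PySem.List.pyRange_one_append (y * 12 + 1) (y * 12 + 13)
      ((y + ((k + 1 : Nat) : Int)) * 12 + 1) (by omega) (by push_cast; nlinarith)
    rw [hsplit, List.map_append, rowEq y 12 1 13 (by norm_num) (by norm_num) (by norm_num)]
    congr 1
    have h2 : y + ((k + 1 : Nat) : Int) = (y + 1) + (k : Int) := by push_cast; ring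
    rw [h2, show y * 12 + 13 = (y + 1) * 12 + 1 from by ring]
    exact ih (y + 1)

-- ===== VERDICT (by name: the statement is the Claim_ definition above) =====
theorem getTimeListFromTuple_spec : Claim_equal_getTimeListFromTuple := by
  intro date _
  obtain ⟨y1, m1, y2, m2⟩ := date
  show getTimeListFromTuple (y1, m1, y2, m2) = getTimeListFromTuple_alt (y1, m1, y2, m2)
  rw [getTimeListFromTuple_eq_map]
  unfold getTimeListFromTuple_alt
  have h12 : (0:Int) < 12 := by norm_num
  simp only [PySem.Int.floordiv_eq_ediv_of_pos h12, PySem.Int.mod_eq_emod_of_pos h12]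
  set ay := y1 + (m1 - 1) / 12 with hay
  set am := (m1 - 1) % 12 + 1 with ham
  set by_ := y2 + (m2 - 1) / 12 with hby
  set bm := (m2 - 1) % 12 + 1 with hbm
  have hea := Int.ediv_add_emod (m1 - 1) 12
  have hla := Int.emod_lt_of_pos (m1 - 1) h12
  have hga := Int.emod_nonneg (m1 - 1) (by norm_num : (12:Int) ≠ 0)
  have heb := Int.ediv_add_emod (m2 - 1) 12
  have hlb := Int.emod_lt_of_pos (m2 - 1) h12
  have hgb := Int.emod_nonneg (m2 - 1) (by norm_num : (12:Int) ≠ 0)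
  have hL : y1 * 12 + m1 = ay * 12 + am := by rw [hay, ham]; nlinarith
  have hR : y2 * 12 + m2 = by_ * 12 + bm := by rw [hby, hbm]; nlinarith
  have ham1 : 1 ≤ am := by omega
  have ham2 : am ≤ 12 := by omega
  have hbm1 : 1 ≤ bm := by omega
  have hbm2 : bm ≤ 12 := by omega
  rw [hL, hR]
  by_cases hempty : by_ < ay ∨ (ay = by_ ∧ bm < am)
  · rw [if_pos hempty]
    rw [PySem.List.pyRange_one_eq_nil (by rcases hempty with h | ⟨h, h'⟩ <;> nlinarith)]
    rfl
  · rw [if_neg hempty]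
    push_neg at hempty
    obtain ⟨hle, hne⟩ := hempty
    by_cases heq : ay = by_
    · rw [if_pos heq, ← heq]
      rw [show ay * 12 + bm + 1 = ay * 12 + (bm + 1) from by ring]
      exact rowEq ay (bm + 1 - am).toNat am (bm + 1)
        (by have := hne heq; omega) ham1 (by omega)
    · rw [if_neg heq]
      have hlt : ay < by_ := by omega
      rw [PySem.List.foldl_append_eq_flatMap]
      have hsplit : PySem.List.pyRange (ay * 12 + am) (by_ * 12 + bm + 1) 1
          = PySem.List.pyRange (ay * 12 + am) (ay * 12 + 13) 1
            ++ (PySem.List.pyRange (ay * 12 + 13) (by_ * 12 + 1) 1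
              ++ PySem.List.pyRange (by_ * 12 + 1) (by_ * 12 + bm + 1) 1) := by
        rw [← PySem.List.pyRange_one_append _ _ _ (by nlinarith) (by omega),
            ← PySem.List.pyRange_one_append _ _ _ (by omega) (by nlinarith)]
      rw [hsplit, List.map_append, List.map_append,
          rowEq ay (13 - am).toNat am 13 (by omega) ham1 (by norm_num),
          List.append_assoc]
      congr 1
      congr 1
      · have h2 : (ay + 1) + ((by_ - (ay + 1)).toNat : Int) = by_ := by omega
        have hmid := yearsEq (by_ - (ay + 1)).toNat (ay + 1)
        rw [h2] at hmid
        rw [show ay * 12 + 13 = (ay + 1) * 12 + 1 from by ring]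
        exact hmid.symm
      · rw [show by_ * 12 + bm + 1 = by_ * 12 + (bm + 1) from by ring]
        exact rowEq by_ bm.toNat 1 (bm + 1) (by omega) (by norm_num) (by omega)
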